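-- pv_equiv track=rewrite | github.com/eunicell78-arch/study-helper | app.py | is_domain_blocked
-- ===== SOURCE A (Python) =====
-- BLOCKED_DOMAINS = [
--     "namu.wiki",
--     "blog.naver.com",
--     "m.blog.naver.com",
--     "tistory.com",
--     "velog.io",
--     "brunch.co.kr",
--     "medium.com",
--     "wordpress.com",
--     "blogspot.com",
--     "cafe.naver.com",
-- ]
--
-- def is_domain_blocked(domain: str) -> bool:
--     domain = domain.lower()
--     if domain.startswith("www."):
--         domain = domain[4:]
--     for blocked in BLOCKED_DOMAINS:
--         if domain == blocked or domain.endswith("." + blocked):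
--             return True
--     return False
-- ===== SOURCE B (Python) =====
-- BLOCKED_DOMAINS = [
--     "namu.wiki",
--     "blog.naver.com",
--     "m.blog.naver.com",
--     "tistory.com",
--     "velog.io",
--     "brunch.co.kr",
--     "medium.com",
--     "wordpress.com",
--     "blogspot.com",
--     "cafe.naver.com",
-- ]
--
-- BLOCKED = set(BLOCKED_DOMAINS)
--
-- def is_domain_blocked(domain: str) -> bool:
--     d = domain.lower()
--     if d.startswith("www."):
--         d = d[4:]
--     if d in BLOCKED:
--         return True
--     return any(d[i + 1:] in BLOCKED for i, ch in enumerate(d) if ch == ".")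
-- ===== Notes on version B (the rewrite author's own statement) =====
-- stated objective: idiomatic
-- what changed: Instead of looping over the blocked list testing equality/endswith per entry, B splits the normalized domain at each dot and tests the domain plus each dot-suffix for membership in a precomputed set of blocked domains.
import Mathlib
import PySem

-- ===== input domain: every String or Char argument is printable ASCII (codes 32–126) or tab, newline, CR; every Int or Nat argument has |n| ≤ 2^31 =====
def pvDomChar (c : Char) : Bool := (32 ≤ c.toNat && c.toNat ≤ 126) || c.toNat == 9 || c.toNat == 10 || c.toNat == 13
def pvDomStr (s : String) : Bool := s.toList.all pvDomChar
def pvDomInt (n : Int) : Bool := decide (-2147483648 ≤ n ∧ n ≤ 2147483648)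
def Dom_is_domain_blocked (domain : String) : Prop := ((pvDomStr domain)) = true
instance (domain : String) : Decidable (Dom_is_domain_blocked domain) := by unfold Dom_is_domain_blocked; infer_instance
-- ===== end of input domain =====

-- B replaces A's per-entry equality/endswith loop over the blocked list by generating the
-- domain's dot-suffixes once and testing each for membership in a set of blocked domains (idiomatic).

-- ===== PORT A =====
def BLOCKED_DOMAINS : List (List Char) :=
  ["namu.wiki".toList, "blog.naver.com".toList, "m.blog.naver.com".toList,
   "tistory.com".toList, "velog.io".toList, "brunch.co.kr".toList,
   "medium.com".toList, "wordpress.com".toList, "blogspot.com".toList,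
   "cafe.naver.com".toList]

def is_domain_blocked (domain : String) : Bool :=
  let d0 := PySem.Chars.lower domain.toList
  let d := if PySem.Chars.startswith d0 "www.".toList then PySem.Chars.slice d0 (some 4) none else d0
  BLOCKED_DOMAINS.any (fun b => d == b || PySem.Chars.endswith d ('.' :: b))

-- ===== PORT B =====
def pvBlockedSet : PySem.Set (List Char) := PySem.Set.ofList BLOCKED_DOMAINS

-- the suffixes d[i+1:] for each position i where d has a '.'
def pvDotTails : List Char → List (List Char)
  | [] => []
  | c :: cs => if c == '.' then cs :: pvDotTails cs else pvDotTails cs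

def is_domain_blocked_alt (domain : String) : Bool :=
  let d0 := PySem.Chars.lower domain.toList
  let d := if PySem.Chars.startswith d0 "www.".toList then PySem.Chars.slice d0 (some 4) none else d0
  PySem.Set.contains pvBlockedSet d || (pvDotTails d).any (fun t => PySem.Set.contains pvBlockedSet t)

-- ===== PRECONDITION & SPEC =====
def Spec_is_domain_blocked (domain : String) (out : Bool) : Prop := out = is_domain_blocked_alt domain
instance (domain : String) (out : Bool) : Decidable (Spec_is_domain_blocked domain out) := by unfold Spec_is_domain_blocked; infer_instance

-- ===== CLAIM (what is proved, stated in full; the proofs are below) =====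
def Claim_equal_is_domain_blocked : Prop := ∀ (domain : String), Dom_is_domain_blocked domain → Spec_is_domain_blocked domain (is_domain_blocked domain)

-- ===== LEMMAS AND PROOFS =====

lemma mem_pvDotTails {t : List Char} : ∀ (cs : List Char), t ∈ pvDotTails cs ↔ ('.' :: t) <:+ cs := by
  intro cs
  induction cs with
  | nil => simp [pvDotTails]
  | cons c cs ih =>
    by_cases h : c = '.'
    · subst h
      simp [pvDotTails, List.suffix_cons_iff, ih]
    · simp [pvDotTails, h, List.suffix_cons_iff, ih, Ne.symm h]

lemma any_eq (d : List Char) :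
    BLOCKED_DOMAINS.any (fun b => d == b || PySem.Chars.endswith d ('.' :: b))
      = (PySem.Set.contains pvBlockedSet d || (pvDotTails d).any (fun t => PySem.Set.contains pvBlockedSet t)) := by
  have hmem : ∀ x : List Char, PySem.Set.contains pvBlockedSet x = true ↔ x ∈ BLOCKED_DOMAINS := by
    intro x
    simp [PySem.Set.contains, pvBlockedSet, PySem.Set.mem_ofList]
  rw [Bool.eq_iff_iff]
  simp only [List.any_eq_true, Bool.or_eq_true, beq_iff_eq, PySem.Chars.endswith_iff, hmem,
    mem_pvDotTails]
  constructor
  · rintro ⟨b, hb, rfl | hs⟩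
    · exact Or.inl hb
    · exact Or.inr ⟨b, hs, hb⟩
  · rintro (hd | ⟨t, hs, ht⟩)
    · exact ⟨d, hd, Or.inl rfl⟩
    · exact ⟨t, ht, Or.inr hs⟩

-- ===== VERDICT (by name: the statement is the Claim_ definition above) =====
theorem is_domain_blocked_spec : Claim_equal_is_domain_blocked := by
  intro domain _
  unfold Spec_is_domain_blocked is_domain_blocked is_domain_blocked_alt
  exact any_eq _
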